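-- pv_equiv track=rewrite | github.com/SantoshRYK/Test_Updated | pages/audit/audit_utils.py | group_logs_by_date
-- ===== SOURCE A (Python) =====
-- from typing import List, Dict, Optional
--
-- def group_logs_by_date(logs: List[Dict]) -> Dict[str, List[Dict]]:
--     """Group audit logs by date"""
--     grouped = {}
--     for log in logs:
--         timestamp = log.get('timestamp', 'N/A')
--         date = timestamp.split()[0] if ' ' in timestamp else timestamp
--
--         if date not in grouped:
--             grouped[date] = []
--         grouped[date].append(log)
--
--     return grouped
-- ===== SOURCE B (Python) =====
-- from typing import List, Dict
--
-- def group_logs_by_date(logs: List[Dict]) -> Dict[str, List[Dict]]: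
--     """Group audit logs by date: distinct dates in first-seen order, then one filter pass per date."""
--     def date_of(log):
--         ts = log.get('timestamp', 'N/A')
--         return ts.split()[0] if ' ' in ts else ts
--     dates = []
--     for log in logs:
--         d = date_of(log)
--         if d not in dates:
--             dates.append(d)
--     return {d: [log for log in logs if date_of(log) == d] for d in dates}
-- ===== Notes on version B (the rewrite author's own statement) =====
-- stated objective: alternative
-- what changed: Instead of one pass mutating per-key dict buckets in place, B first collects the distinct date keys in first-seen order and then builds the result as a dict comprehension that filters the log list once per date.
import Mathlib
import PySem

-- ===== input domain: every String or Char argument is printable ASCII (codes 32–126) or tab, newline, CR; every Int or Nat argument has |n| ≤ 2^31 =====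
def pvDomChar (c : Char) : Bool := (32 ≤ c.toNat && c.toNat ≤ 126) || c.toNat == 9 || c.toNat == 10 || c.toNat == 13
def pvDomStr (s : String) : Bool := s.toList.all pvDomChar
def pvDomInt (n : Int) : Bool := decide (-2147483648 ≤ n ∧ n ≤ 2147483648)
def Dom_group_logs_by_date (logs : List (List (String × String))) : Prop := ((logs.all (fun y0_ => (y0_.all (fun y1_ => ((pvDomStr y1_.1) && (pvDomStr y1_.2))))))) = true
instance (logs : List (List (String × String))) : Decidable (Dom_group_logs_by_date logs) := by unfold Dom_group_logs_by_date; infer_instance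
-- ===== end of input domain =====

-- B replaces A's in-place dict-bucket mutation by collecting the distinct date keys first and
-- filtering the log list once per date (alternative decomposition, same return value).


-- ===== PORT A =====
-- timestamp.split()[0] uses pyGet? (none = IndexError, excluded by Pre_); the .getD "" default
-- is only reachable outside Pre_.
def group_logs_by_date (logs : List (List (String × String))) : List (String × List (List (String × String))) :=
  (logs.foldl (fun grouped log =>
      let timestamp := (PySem.Dict.mk log).getD "timestamp" "N/A"
      let date := if PySem.Str.isIn " " timestamp
                  then (PySem.List.pyGet? (PySem.Str.split₀ timestamp) 0).getD ""
                  else timestamp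
      let g := if grouped.contains date then grouped else grouped.insert date []
      g.modify date [] (fun v => v ++ [log]))
    (PySem.Dict.empty : PySem.Dict String (List (List (String × String))))).items

-- ===== PORT B =====
def pvDateOf (log : List (String × String)) : String :=
  let ts := (PySem.Dict.mk log).getD "timestamp" "N/A"
  if PySem.Str.isIn " " ts then (PySem.List.pyGet? (PySem.Str.split₀ ts) 0).getD "" else ts

def group_logs_by_date_alt (logs : List (List (String × String))) : List (String × List (List (String × String))) :=
  let dates := logs.foldl (fun ds log => PySem.Set.add ds (pvDateOf log)) PySem.Set.empty
  dates.map (fun d => (d, logs.filter (fun log => pvDateOf log == d)))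

-- ===== PRECONDITION & SPEC =====
-- Pre_ excludes exactly the inputs on which Python A raises IndexError: a log whose timestamp
-- value contains ' ' but consists only of whitespace, so that timestamp.split() is empty.
def Pre_group_logs_by_date (logs : List (List (String × String))) : Prop :=
  (logs.all (fun log =>
    let ts := (PySem.Dict.mk log).getD "timestamp" "N/A"
    !(PySem.Str.isIn " " ts) || !(PySem.Str.split₀ ts).isEmpty)) = true
instance (logs : List (List (String × String))) : Decidable (Pre_group_logs_by_date logs) := by unfold Pre_group_logs_by_date; infer_instance
def pvWitness_group_logs_by_date : (List (List (String × String))) :=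
  [[("timestamp", "2024-01-02 10:00"), ("user", "bob")], [("timestamp", "2024-01-02 11:30")], [("x", "1")]]

def Spec_group_logs_by_date (logs : List (List (String × String))) (out : List (String × List (List (String × String)))) : Prop := out = group_logs_by_date_alt logs
instance (logs : List (List (String × String))) (out : List (String × List (List (String × String)))) : Decidable (Spec_group_logs_by_date logs out) := by unfold Spec_group_logs_by_date; infer_instance

-- ===== CLAIM (what is proved, stated in full; the proofs are below) =====
def Claim_equal_group_logs_by_date : Prop := ∀ (logs : List (List (String × String))), Dom_group_logs_by_date logs → Pre_group_logs_by_date logs → Spec_group_logs_by_date logs (group_logs_by_date logs)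

-- ===== LEMMAS AND PROOFS =====

-- A's loop body (membership test, empty-bucket insert, append) is exactly Dict.modify.
theorem pvStepA_eq_modify (d : PySem.Dict String (List (List (String × String)))) (k : String)
    (log : List (String × String)) :
    (if d.contains k then d else d.insert k []).modify k [] (fun v => v ++ [log])
      = d.modify k [] (fun v => v ++ [log]) := by
  by_cases h : d.contains k = true
  · simp [h]
  · have h' : d.contains k = false := by simpa using h
    have hk : ∀ p ∈ d.items, (p.1 == k) = false := by
      intro p hp
      by_contra hc
      simp only [Bool.not_eq_false] at hc
      exact h (List.any_eq_true.mpr ⟨p, hp, hc⟩)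
    rw [if_neg h]
    apply PySem.Dict.ext
    simp only [PySem.Dict.modify]
    rw [PySem.Dict.getD_insert_self, PySem.Dict.getD_of_not_contains d [] h',
        PySem.Dict.items_insert_of_contains _ _ (PySem.Dict.contains_insert_self d k []),
        PySem.Dict.items_insert_of_not_contains _ _ h',
        PySem.Dict.items_insert_of_not_contains _ _ h']
    simp only [List.map_append, List.map_cons, List.map_nil, beq_self_eq_true, if_true,
      List.nil_append]
    congr 1
    have hid : ∀ p ∈ d.items,
        (if (p.1 == k) = true then (k, [log]) else p) = id p :=
      fun p hp => by simp [hk p hp]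
    rw [List.map_congr_left hid, List.map_id]

-- Characterisation of A's result: the items of the grouped dict are the distinct date keys in
-- first-seen order, each paired with the filter of the logs carrying that date.
theorem pvA_items (logs : List (List (String × String))) :
    group_logs_by_date logs
      = (PySem.Set.ofList (logs.map pvDateOf)).map
          (fun k => (k, logs.filter (fun log => pvDateOf log == k))) := by
  have hstep : (fun (grouped : PySem.Dict String (List (List (String × String)))) log =>
      let timestamp := (PySem.Dict.mk log).getD "timestamp" "N/A"
      let date := if PySem.Str.isIn " " timestamp
                  then (PySem.List.pyGet? (PySem.Str.split₀ timestamp) 0).getD ""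
                  else timestamp
      let g := if grouped.contains date then grouped else grouped.insert date []
      g.modify date [] (fun v => v ++ [log]))
      = (fun (grouped : PySem.Dict String (List (List (String × String)))) log =>
          grouped.modify (pvDateOf log) [] (fun v => v ++ [log])) := by
    funext d log
    exact pvStepA_eq_modify d (pvDateOf log) log
  have hkeys : (logs.foldl (fun d log => d.modify (pvDateOf log) [] (fun v => v ++ [log]))
      (PySem.Dict.empty : PySem.Dict String (List (List (String × String))))).keys
      = PySem.Set.ofList (logs.map pvDateOf) := by
    rw [PySem.Dict.keys_foldl_modify_key logs pvDateOf [] (fun _ x v => v ++ [x]) PySem.Dict.empty,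
        PySem.Dict.keys_empty, PySem.Set.update_nil_left]
  have hnd : (logs.foldl (fun d log => d.modify (pvDateOf log) [] (fun v => v ++ [log]))
      (PySem.Dict.empty : PySem.Dict String (List (List (String × String))))).keys.Nodup := by
    exact PySem.Dict.nodup_keys_foldl_modify_key logs pvDateOf [] (fun _ x v => v ++ [x])
      PySem.Dict.empty (by rw [PySem.Dict.keys_empty]; exact List.nodup_nil)
  have hget : ∀ k, (logs.foldl (fun d log => d.modify (pvDateOf log) [] (fun v => v ++ [log]))
      (PySem.Dict.empty : PySem.Dict String (List (List (String × String))))).getD k []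
      = logs.filter (fun log => pvDateOf log == k) := by
    intro k
    have hmap : (logs.map (fun l => (pvDateOf l, l))).foldl
        (fun (d : PySem.Dict String (List (List (String × String))))
             (p : String × List (String × String)) => d.modify p.1 [] (fun v => v ++ [p.2]))
        PySem.Dict.empty
        = logs.foldl (fun d log => d.modify (pvDateOf log) [] (fun v => v ++ [log]))
            PySem.Dict.empty := by
      rw [List.foldl_map]
    rw [← hmap, PySem.Dict.getD_foldl_modify_append, PySem.Dict.getD_empty]
    simp [List.filter_map, Function.comp_def]
  unfold group_logs_by_date
  rw [hstep, PySem.Dict.items_eq_map_keys _ hnd [], hkeys]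
  exact List.map_congr_left (fun k _ => by rw [hget k])

-- ===== VERDICT (by name: the statement is the Claim_ definition above) =====
theorem group_logs_by_date_spec : Claim_equal_group_logs_by_date := by
  intro logs _ _
  show group_logs_by_date logs = group_logs_by_date_alt logs
  rw [pvA_items]
  unfold group_logs_by_date_alt
  rw [← PySem.Set.update_map_eq_foldl_add, PySem.Set.update_empty]
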